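-- pv_equiv track=rewrite | github.com/Sunanda123-png/Logical_problem | logical/consecutive_run.py | consequtive_run
-- ===== SOURCE A (Python) =====
-- def consequtive_run(num):
--     current_length = 1
--     long_run = 1
--     for i in range(1, len(num)):
--         if num[i] == num[i - 1] + 1 or num[i] == num[i - 1] - 1:
--             current_length += 1
--             long_run = max(long_run, current_length)
--         else:
--             current_length = 1
--     return long_run
-- ===== SOURCE B (Python) =====
-- def consequtive_run(num):
--     # Adjacency flags, then run lengths as gaps between positions of False flags.
--     flags = [abs(b - a) == 1 for a, b in zip(num, num[1:])]
--     breaks = [-1] + [i for i, f in enumerate(flags) if not f] + [len(flags)]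
--     gaps = [b - a - 1 for a, b in zip(breaks, breaks[1:])]
--     return max(gaps) + 1
-- ===== Notes on version B (the rewrite author's own statement) =====
-- stated objective: alternative
-- what changed: Instead of A's single index loop carrying a running counter and running maximum, B first builds the list of adjacency flags (|num[i]-num[i-1]|==1), collects the positions where the flag is False as break points (with sentinels -1 and len(flags)), and returns the largest gap between consecutive break points plus one.
import Mathlib
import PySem

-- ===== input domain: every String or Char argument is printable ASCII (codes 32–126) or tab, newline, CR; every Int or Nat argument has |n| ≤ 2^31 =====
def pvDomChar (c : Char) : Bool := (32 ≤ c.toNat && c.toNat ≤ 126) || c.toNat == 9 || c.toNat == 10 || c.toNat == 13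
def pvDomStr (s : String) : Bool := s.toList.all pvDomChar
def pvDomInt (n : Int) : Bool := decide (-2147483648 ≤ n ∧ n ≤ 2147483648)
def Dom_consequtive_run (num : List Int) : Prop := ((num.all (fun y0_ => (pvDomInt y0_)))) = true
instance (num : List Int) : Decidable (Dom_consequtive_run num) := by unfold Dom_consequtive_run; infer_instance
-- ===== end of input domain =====

-- B recomputes the same result from the positions of the non-adjacent pairs (gap arithmetic
-- between break indices) instead of A's inline running counter; objective: alternative, not faster.

-- ===== PORT A =====
def consequtive_run (num : List Int) : Int :=
  let r := (PySem.List.pyRange 1 (num.length : Int) 1).foldl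
    (fun (st : Int × Int) i =>
      if PySem.List.pyGetD num i 0 = PySem.List.pyGetD num (i - 1) 0 + 1 ∨
         PySem.List.pyGetD num i 0 = PySem.List.pyGetD num (i - 1) 0 - 1 then
        (st.1 + 1, max st.2 (st.1 + 1))
      else ((1 : Int), st.2)) ((1 : Int), (1 : Int))
  r.2

-- ===== PORT B =====
def consequtive_run_alt (num : List Int) : Int :=
  let flags : List Bool := (num.zip num.tail).map (fun p => decide ((p.2 - p.1).natAbs = 1))
  let breaks : List Int :=
    [-1] ++ ((PySem.List.enumerate flags 0).filter (fun p => !p.2)).map (·.1)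
        ++ [(flags.length : Int)]
  let gaps : List Int := (breaks.zip breaks.tail).map (fun p => p.2 - p.1 - 1)
  -- gaps is never empty (breaks has at least two elements), so Python's max(gaps) returns
  (PySem.List.max? gaps (fun x => x)).getD 0 + 1

-- ===== PRECONDITION & SPEC =====
def Spec_consequtive_run (num : List Int) (out : Int) : Prop := out = consequtive_run_alt num
instance (num : List Int) (out : Int) : Decidable (Spec_consequtive_run num out) := by unfold Spec_consequtive_run; infer_instance

-- ===== CLAIM (what is proved, stated in full; the proofs are below) =====
def Claim_equal_consequtive_run : Prop := ∀ (num : List Int), Dom_consequtive_run num → Spec_consequtive_run num (consequtive_run num)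

-- ===== LEMMAS AND PROOFS =====

-- proof-side helpers
def pvStep (st : Int × Int) (f : Bool) : Int × Int :=
  if f then (st.1 + 1, max st.2 (st.1 + 1)) else ((1 : Int), st.2)

def pvBest : Int → List Bool → Int
  | c, [] => c
  | c, true :: bs => pvBest (c + 1) bs
  | c, false :: bs => max c (pvBest 1 bs)

def pvM (gs : List (List Bool)) : Int :=
  gs.foldl (fun m g => max m (1 + (g.length : Int))) 1

def pvBrk (s : Int) (bs : List Bool) : List Int :=
  ((PySem.List.enumerate bs s).filter (fun p => !p.2)).map (·.1) ++ [s + (bs.length : Int)]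

lemma pvZip_append (xs : List Int) (y : Int) (h : xs ≠ []) :
    (xs ++ [y]).zip ((xs ++ [y]).tail) = xs.zip xs.tail ++ [(xs.getD (xs.length - 1) 0, y)] := by
  induction xs with
  | nil => exact absurd rfl h
  | cons x xs ih =>
    cases xs with
    | nil => simp [List.zip]
    | cons x' t =>
      have := ih (by simp)
      simp only [List.cons_append, List.tail_cons, List.zip_cons_cons] at this ⊢
      rw [this]
      simp [List.getD_eq_getElem?_getD]
      rfl

-- A's index loop over range(1, len) equals the fold over adjacent pairs
lemma pvA_fold (num : List Int) (st : Int × Int) :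
    (PySem.List.pyRange 1 (num.length : Int) 1).foldl
      (fun (st : Int × Int) i =>
        if PySem.List.pyGetD num i 0 = PySem.List.pyGetD num (i - 1) 0 + 1 ∨
           PySem.List.pyGetD num i 0 = PySem.List.pyGetD num (i - 1) 0 - 1 then
          (st.1 + 1, max st.2 (st.1 + 1))
        else ((1 : Int), st.2)) st
    = (num.zip num.tail).foldl
        (fun (st : Int × Int) p =>
          if p.2 = p.1 + 1 ∨ p.2 = p.1 - 1 then
            (st.1 + 1, max st.2 (st.1 + 1))
          else ((1 : Int), st.2)) st := by
  induction num using List.reverseRecOn generalizing st with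
  | nil => simp [PySem.List.pyRange_one_eq_nil (by norm_num : (1:Int) ≤ 1)]
  | append_singleton xs y ih =>
    by_cases hne : xs = []
    · subst hne
      simp [PySem.List.pyRange_one_eq_nil (by norm_num : (1:Int) ≤ 1), List.zip]
    · have hpos : 0 < xs.length := List.length_pos_of_ne_nil hne
      have hlen : 1 ≤ (xs.length : Int) := by omega
      have hrange : PySem.List.pyRange 1 (((xs ++ [y]).length : Nat) : Int) 1
          = PySem.List.pyRange 1 (xs.length : Int) 1 ++ [(xs.length : Int)] := by
        have h : (((xs ++ [y]).length : Nat) : Int) = (xs.length : Int) + 1 := by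
          simp
        rw [h, PySem.List.pyRange_one_succ_right hlen]
      rw [hrange, List.foldl_append]
      -- on indices 1 ≤ i < len xs, (xs ++ [y])[i] and (xs ++ [y])[i-1] are xs[i], xs[i-1]
      have hcongr : (PySem.List.pyRange 1 (xs.length : Int) 1).foldl
          (fun (st : Int × Int) i =>
            if PySem.List.pyGetD (xs ++ [y]) i 0 = PySem.List.pyGetD (xs ++ [y]) (i - 1) 0 + 1 ∨
               PySem.List.pyGetD (xs ++ [y]) i 0 = PySem.List.pyGetD (xs ++ [y]) (i - 1) 0 - 1 then
              (st.1 + 1, max st.2 (st.1 + 1))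
            else ((1 : Int), st.2)) st
          = (PySem.List.pyRange 1 (xs.length : Int) 1).foldl
          (fun (st : Int × Int) i =>
            if PySem.List.pyGetD xs i 0 = PySem.List.pyGetD xs (i - 1) 0 + 1 ∨
               PySem.List.pyGetD xs i 0 = PySem.List.pyGetD xs (i - 1) 0 - 1 then
              (st.1 + 1, max st.2 (st.1 + 1))
            else ((1 : Int), st.2)) st := by
        refine PySem.List.foldl_congr_mem _ _ _ _ ?_
        intro acc i hi
        rw [PySem.List.mem_pyRange_one] at hi
        have h1 : PySem.List.pyGetD (xs ++ [y]) i 0 = PySem.List.pyGetD xs i 0 := by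
          rw [PySem.List.pyGetD_of_nonneg _ 0 (by omega),
              PySem.List.pyGetD_of_nonneg _ 0 (by omega),
              List.getD_eq_getElem?_getD, List.getD_eq_getElem?_getD,
              List.getElem?_append_left (by omega)]
        have h2 : PySem.List.pyGetD (xs ++ [y]) (i - 1) 0 = PySem.List.pyGetD xs (i - 1) 0 := by
          rw [PySem.List.pyGetD_of_nonneg _ 0 (by omega),
              PySem.List.pyGetD_of_nonneg _ 0 (by omega),
              List.getD_eq_getElem?_getD, List.getD_eq_getElem?_getD,
              List.getElem?_append_left (by omega)]
        rw [h1, h2]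
      rw [hcongr, ih]
      -- the final index: positions len-1 and len of xs ++ [y]
      have hy : PySem.List.pyGetD (xs ++ [y]) (xs.length : Int) 0 = y := by
        rw [PySem.List.pyGetD_of_nonneg _ 0 (by omega)]
        simp [List.getD_eq_getElem?_getD]
      have hlast : PySem.List.pyGetD (xs ++ [y]) ((xs.length : Int) - 1) 0
          = xs.getD (xs.length - 1) 0 := by
        rw [PySem.List.pyGetD_of_nonneg _ 0 (by omega)]
        have h : ((xs.length : Int) - 1).toNat = xs.length - 1 := by omega
        rw [h, List.getD_eq_getElem?_getD, List.getD_eq_getElem?_getD,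
            List.getElem?_append_left (by omega)]
      rw [pvZip_append xs y hne, List.foldl_append]
      simp only [List.foldl_cons, List.foldl_nil, hy, hlast]

-- the pair fold is the flag fold
lemma pvFlag_fold (num : List Int) (st : Int × Int) :
    (num.zip num.tail).foldl
      (fun (st : Int × Int) p =>
        if p.2 = p.1 + 1 ∨ p.2 = p.1 - 1 then
          (st.1 + 1, max st.2 (st.1 + 1))
        else ((1 : Int), st.2)) st
    = ((num.zip num.tail).map (fun p => decide ((p.2 - p.1).natAbs = 1))).foldl pvStep st := by
  rw [List.foldl_map]
  refine PySem.List.foldl_congr_mem _ _ _ _ ?_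
  intro acc p _
  by_cases hc : (p.2 - p.1).natAbs = 1
  · rw [if_pos (by omega)]; simp [pvStep, hc]
  · rw [if_neg (by omega)]; simp [pvStep, hc]

lemma pvBest_ge (bs : List Bool) (c : Int) : c ≤ pvBest c bs := by
  induction bs generalizing c with
  | nil => simp [pvBest]
  | cons b bs ih =>
    cases b
    · exact le_max_left _ _
    · exact le_trans (by omega) (ih (c + 1))

lemma pvFold_best (bs : List Bool) (cl lr : Int) (h1 : 1 ≤ cl) (h2 : cl ≤ lr) :
    (bs.foldl pvStep (cl, lr)).2 = max lr (pvBest cl bs) := by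
  induction bs generalizing cl lr with
  | nil => simp only [List.foldl_nil, pvBest]; simp only [max_def]; split_ifs <;> omega
  | cons b bs ih =>
    cases b
    · -- false
      rw [List.foldl_cons, show pvStep (cl, lr) false = ((1 : Int), lr) from rfl]
      rw [ih 1 lr (by omega) (by omega)]
      simp only [pvBest]
      have := pvBest_ge bs 1
      simp only [max_def]; split_ifs <;> omega
    · -- true
      rw [List.foldl_cons,
          show pvStep (cl, lr) true = (cl + 1, max lr (cl + 1)) from rfl]
      rw [ih (cl + 1) (max lr (cl + 1)) (by omega) (le_max_right _ _)]
      simp only [pvBest]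
      have := pvBest_ge bs (cl + 1)
      simp only [max_def]; split_ifs <;> omega

-- rearranging a running max
lemma pvFoldM_max (gs : List (List Bool)) (a b : Int) :
    gs.foldl (fun m g => max m (1 + (g.length : Int))) (max a b)
    = max a (gs.foldl (fun m g => max m (1 + (g.length : Int))) b) := by
  induction gs generalizing b with
  | nil => simp
  | cons g gs ih =>
    simp only [List.foldl_cons, max_assoc]
    exact ih (max b (1 + (g.length : Int)))

lemma pvM_cons (g : List Bool) (gs : List (List Bool)) :
    pvM (g :: gs) = max (1 + (g.length : Int)) (pvM gs) := by
  unfold pvM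
  simp only [List.foldl_cons]
  rw [show max (1 : Int) (1 + (g.length : Int)) = max (1 + (g.length : Int)) 1 from max_comm _ _,
      pvFoldM_max]

lemma pvBest_splitOn (bs : List Bool) (c : Int) (g : List Bool) (gs : List (List Bool))
    (h1 : 1 ≤ c) (hsp : List.splitOnP (fun b => !b) bs = g :: gs) :
    pvBest c bs = max (c + (g.length : Int)) (pvM gs) := by
  induction bs generalizing c g gs with
  | nil =>
    rw [List.splitOnP_nil] at hsp
    injection hsp with hg hgs
    subst hg; subst hgs
    simp only [pvBest, pvM, List.foldl_nil, List.length_nil, Nat.cast_zero, add_zero]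
    simp only [max_def]; split_ifs <;> omega
  | cons b bs ih =>
    cases b
    · -- false: a new empty group starts
      rw [List.splitOnP_cons] at hsp
      simp only [Bool.not_false, if_pos rfl] at hsp
      injection hsp with hg hgs
      subst hg
      obtain ⟨g0, gs0, hsp0⟩ : ∃ g0 gs0, List.splitOnP (fun b => !b) bs = g0 :: gs0 := by
        cases hq : List.splitOnP (fun b => !b) bs with
        | nil => exact absurd hq (List.splitOnP_ne_nil _ _)
        | cons a t => exact ⟨a, t, rfl⟩
      rw [hsp0] at hgs
      subst hgs
      simp only [pvBest]
      rw [ih 1 g0 gs0 (by omega) hsp0, pvM_cons]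
      simp only [List.length_nil, Nat.cast_zero, add_zero]
    · -- true: the first group grows
      rw [List.splitOnP_cons] at hsp
      simp only [Bool.not_true] at hsp
      rw [if_neg (by simp)] at hsp
      obtain ⟨g0, gs0, hsp0⟩ : ∃ g0 gs0, List.splitOnP (fun b => !b) bs = g0 :: gs0 := by
        cases hq : List.splitOnP (fun b => !b) bs with
        | nil => exact absurd hq (List.splitOnP_ne_nil _ _)
        | cons a t => exact ⟨a, t, rfl⟩
      rw [hsp0] at hsp
      simp only [List.modifyHead_cons] at hsp
      injection hsp with hg hgs
      subst hg; subst hgs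
      simp only [pvBest]
      rw [ih (c + 1) g0 gs0 (by omega) hsp0]
      have : c + 1 + (g0.length : Int) = c + ((true :: g0).length : Int) := by
        simp; omega
      rw [this]

-- the gap list of B is exactly the list of group lengths
lemma pvGaps_eq (bs : List Bool) (s a : Int) (g : List Bool) (gs : List (List Bool))
    (hsp : List.splitOnP (fun b => !b) bs = g :: gs) :
    ((a :: pvBrk s bs).zip (pvBrk s bs)).map (fun p => p.2 - p.1 - 1)
    = (s + (g.length : Int) - a - 1) :: gs.map (fun h => ((h.length : Int))) := by
  induction bs generalizing s a g gs with
  | nil =>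
    rw [List.splitOnP_nil] at hsp
    injection hsp with hg hgs
    subst hg; subst hgs
    simp [pvBrk, PySem.List.enumerate]
  | cons b bs ih =>
    cases b
    · -- false at position s
      rw [List.splitOnP_cons] at hsp
      simp only [Bool.not_false, if_pos rfl] at hsp
      injection hsp with hg hgs
      subst hg
      obtain ⟨g0, gs0, hsp0⟩ : ∃ g0 gs0, List.splitOnP (fun b => !b) bs = g0 :: gs0 := by
        cases hq : List.splitOnP (fun b => !b) bs with
        | nil => exact absurd hq (List.splitOnP_ne_nil _ _)
        | cons x t => exact ⟨x, t, rfl⟩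
      rw [hsp0] at hgs
      subst hgs
      have hbrk : pvBrk s (false :: bs) = s :: pvBrk (s + 1) bs := by
        unfold pvBrk
        rw [PySem.List.enumerate_cons]
        simp only [List.filter_cons, Bool.not_false, List.map_cons, List.cons_append]
        congr 2
        simp; omega
      rw [hbrk, List.zip_cons_cons, List.map_cons]
      rw [show ((s :: pvBrk (s + 1) bs).zip (pvBrk (s + 1) bs)).map (fun p => p.2 - p.1 - 1)
            = ((s + 1) + (g0.length : Int) - s - 1) :: gs0.map (fun h => ((h.length : Int)))
          from ih (s + 1) s g0 gs0 hsp0]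
      simp only [List.map_cons, List.length_nil, Nat.cast_zero]
      congr 1
      · omega
      · congr 1; omega
    · -- true at position s
      rw [List.splitOnP_cons] at hsp
      simp only [Bool.not_true] at hsp
      rw [if_neg (by simp)] at hsp
      obtain ⟨g0, gs0, hsp0⟩ : ∃ g0 gs0, List.splitOnP (fun b => !b) bs = g0 :: gs0 := by
        cases hq : List.splitOnP (fun b => !b) bs with
        | nil => exact absurd hq (List.splitOnP_ne_nil _ _)
        | cons x t => exact ⟨x, t, rfl⟩
      rw [hsp0] at hsp
      simp only [List.modifyHead_cons] at hsp
      injection hsp with hg hgs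
      subst hg; subst hgs
      have hbrk : pvBrk s (true :: bs) = pvBrk (s + 1) bs := by
        unfold pvBrk
        rw [PySem.List.enumerate_cons]
        simp only [List.filter_cons, Bool.not_true]
        congr 2
        simp; omega
      rw [hbrk, ih (s + 1) a g0 gs0 hsp0]
      congr 1
      simp; omega

lemma pvPlus_fold (gs : List (List Bool)) (a : Int) :
    gs.foldl (fun m g => max m (1 + (g.length : Int))) (1 + a)
    = 1 + gs.foldl (fun m g => max m ((g.length : Int))) a := by
  induction gs generalizing a with
  | nil => simp
  | cons g gs ih =>
    simp only [List.foldl_cons]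
    rw [max_add_add_left]
    exact ih (max a (g.length : Int))

lemma pvMax_eq (g : List Bool) (gs : List (List Bool)) :
    (gs.map (fun h => ((h.length : Int)))).foldl max (g.length : Int) + 1
    = max (1 + (g.length : Int)) (pvM gs) := by
  rw [List.foldl_map]
  have h1 : pvM gs = gs.foldl (fun m g => max m (1 + (g.length : Int))) 1 := rfl
  have h2 : gs.foldl (fun m g => max m (1 + (g.length : Int))) (1 + (g.length : Int))
      = max (1 + (g.length : Int)) (pvM gs) := by
    rw [h1, ← pvFoldM_max]
    congr 1
    simp only [max_def]; split_ifs <;> omega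
  rw [← h2, pvPlus_fold]
  omega

lemma pvMain (num : List Int) : consequtive_run num = consequtive_run_alt num := by
  unfold consequtive_run consequtive_run_alt
  simp only []
  set F : List Bool := (num.zip num.tail).map (fun p => decide ((p.2 - p.1).natAbs = 1)) with hF
  obtain ⟨g, gs, hsp⟩ : ∃ g gs, List.splitOnP (fun b => !b) F = g :: gs := by
    cases hq : List.splitOnP (fun b => !b) F with
    | nil => exact absurd hq (List.splitOnP_ne_nil _ _)
    | cons x t => exact ⟨x, t, rfl⟩
  -- A's side
  rw [pvA_fold, pvFlag_fold, ← hF, pvFold_best F 1 1 (by omega) (by omega),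
      pvBest_splitOn F 1 g gs (by omega) hsp]
  -- B's side
  have hbr : ([-1] ++ ((PySem.List.enumerate F 0).filter (fun p => !p.2)).map (·.1)
        ++ [(F.length : Int)]) = (-1 : Int) :: pvBrk 0 F := by
    unfold pvBrk
    simp
  rw [hbr]
  rw [show ((-1 : Int) :: pvBrk 0 F).tail = pvBrk 0 F from rfl]
  rw [pvGaps_eq F 0 (-1) g gs hsp]
  rw [show (0 : Int) + (g.length : Int) - (-1) - 1 = (g.length : Int) by omega]
  rw [PySem.List.max?_id_cons, Option.getD_some, pvMax_eq]
  have hg : 1 ≤ 1 + (g.length : Int) := by omega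
  simp only [max_def]; split_ifs <;> omega

-- ===== VERDICT (by name: the statement is the Claim_ definition above) =====
theorem consequtive_run_spec : Claim_equal_consequtive_run := by
  intro num _
  unfold Spec_consequtive_run
  exact pvMain num
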